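-- pv_equiv track=rewrite | github.com/adcosta17/somrit-test | scripts/generate_pbsim_run_nested.py | get_polya_len
-- ===== SOURCE A (Python) =====
-- def get_polya_len(seq):
--     i = -1
--     n = 0
--     while(n < len(seq)):
--         if seq[i] != "A":
--             break
--         i -= 1
--         n += 1
--     return n
-- ===== SOURCE B (Python) =====
-- def get_polya_len(seq):
--     return len(seq) - len(seq.rstrip("A"))
-- ===== Notes on version B (the rewrite author's own statement) =====
-- stated objective: idiomatic
-- what changed: Replaced the manual backward-index while-loop with counter by a closed-form expression: len(seq) - len(seq.rstrip('A')).
import Mathlib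
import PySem

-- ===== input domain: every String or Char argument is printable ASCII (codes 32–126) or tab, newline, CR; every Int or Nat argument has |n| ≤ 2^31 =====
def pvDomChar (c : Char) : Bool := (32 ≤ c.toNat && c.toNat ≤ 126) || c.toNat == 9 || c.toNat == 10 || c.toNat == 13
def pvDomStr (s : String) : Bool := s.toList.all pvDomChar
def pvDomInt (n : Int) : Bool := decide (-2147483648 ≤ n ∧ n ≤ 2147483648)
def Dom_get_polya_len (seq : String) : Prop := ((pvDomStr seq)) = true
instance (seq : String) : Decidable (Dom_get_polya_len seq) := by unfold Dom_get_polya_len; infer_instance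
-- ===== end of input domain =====

-- B replaces the manual backward-index loop by the closed form len(seq) - len(seq.rstrip("A")) (idiomatic; same cost).
-- ===== PORT A =====
def get_polya_len_loop (seq : String) (i : Int) (n : Nat) : Nat :=
  if n < PySem.Str.len seq then
    if PySem.Str.pyGet? seq i ≠ some 'A' then n
    else get_polya_len_loop seq (i - 1) (n + 1)
  else n
termination_by (PySem.Str.len seq - (n : Int)).toNat
decreasing_by simp [PySem.Str.len] at *; omega

def get_polya_len (seq : String) : Int :=
  (get_polya_len_loop seq (-1) 0 : Int)

-- ===== PORT B =====
-- hand port of seq.rstrip("A") (PySem has no per-character rstrip): drop trailing 'A's; exact for the one-char strip set "A"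
def pyRstripA (s : List Char) : List Char :=
  (s.reverse.dropWhile (· == 'A')).reverse

def get_polya_len_alt (seq : String) : Int :=
  (PySem.Str.len seq : Int) - ((pyRstripA seq.toList).length : Int)

-- ===== PRECONDITION & SPEC =====
def Spec_get_polya_len (seq : String) (out : Int) : Prop := out = get_polya_len_alt seq
instance (seq : String) (out : Int) : Decidable (Spec_get_polya_len seq out) := by unfold Spec_get_polya_len; infer_instance

-- ===== CLAIM (what is proved, stated in full; the proofs are below) =====
def Claim_equal_get_polya_len : Prop := ∀ (seq : String), Dom_get_polya_len seq → Spec_get_polya_len seq (get_polya_len seq)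

-- ===== LEMMAS AND PROOFS =====
theorem get_polya_len_loop_eq (seq : String) :
    ∀ k n, k = seq.toList.length - n → n ≤ seq.toList.length →
    get_polya_len_loop seq (-1 - (n : Int)) n
      = n + ((seq.toList.reverse.drop n).takeWhile (· == 'A')).length := by
  intro k
  induction k with
  | zero =>
    intro n hk hn
    have hlen : n = seq.toList.length := by omega
    rw [get_polya_len_loop.eq_def]
    simp [hlen]
  | succ k ih =>
    intro n hk hn
    have hlt : n < seq.toList.length := by omega
    have hL : seq.toList.length = seq.length := String.length_toList
    have hidx : PySem.List.pyIdx? seq.toList.length (-1 - (n : Int))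
        = some (seq.toList.length - 1 - n) := by
      simp only [PySem.List.pyIdx?]
      rw [if_neg (by omega), if_pos (by omega)]
      congr 1
      omega
    have hget : PySem.Str.pyGet? seq (-1 - (n : Int))
        = some (seq.toList.reverse[n]'(by simpa using hlt)) := by
      have h1 : PySem.Str.pyGet? seq (-1 - (n : Int))
          = PySem.List.pyGet? seq.toList (-1 - (n : Int)) := by
        simp
      rw [h1, PySem.List.pyGet?, hidx]
      simp only [Option.bind_some]
      rw [List.getElem?_eq_getElem (by omega)]
      congr 1
      rw [List.getElem_reverse]
    rw [get_polya_len_loop.eq_def]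
    have hdrop : seq.toList.reverse.drop n
        = seq.toList.reverse[n]'(by simpa using hlt) :: seq.toList.reverse.drop (n + 1) := by
      rw [List.getElem_cons_drop]
    by_cases hA : seq.toList.reverse[n]'(by simpa using hlt) = 'A'
    · have h2 : (-1 - (n : Int)) - 1 = -1 - ((n + 1 : Nat) : Int) := by push_cast; ring
      rw [if_pos (by simp [PySem.Str.len]; omega),
        if_neg (by rw [hget]; simp [hA]), h2, ih (n + 1) (by omega) (by omega), hdrop,
        List.takeWhile_cons, if_pos (by simp [hA])]
      simp only [List.length_cons]
      omega
    · rw [if_pos (by simp [PySem.Str.len]; omega),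
        if_pos (by rw [hget]; simpa [List.getElem_reverse, hL] using hA), hdrop,
        List.takeWhile_cons,
        if_neg (by simpa using hA)]
      simp

-- ===== VERDICT (by name: the statement is the Claim_ definition above) =====
theorem get_polya_len_spec : Claim_equal_get_polya_len := by
  intro seq _
  unfold Spec_get_polya_len get_polya_len get_polya_len_alt pyRstripA
  have h := get_polya_len_loop_eq seq (seq.toList.length) 0 (by omega) (by omega)
  simp only [Nat.cast_zero, zero_add, List.drop_zero] at h
  norm_num at h
  have hsum := congrArg List.length (List.takeWhile_append_dropWhile (p := (· == 'A')) (l := seq.toList.reverse))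
  simp only [List.length_append, List.length_reverse] at hsum
  simp only [PySem.Str.len, List.length_reverse, h]
  omega
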